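-- pv_equiv track=rewrite | github.com/Chenkai0515/hbv-nanopore-wgs-pipeline | scripts/04_variants/11.4_ivar_clair3_filter_batch.py | hmer_len_at
-- ===== SOURCE A (Python) =====
-- def hmer_len_at(seq: str, pos1: int) -> int:
--     """Calculate homopolymer length at given position (1-based)"""
--     if not seq:
--         return 0
--     i = pos1 - 1
--     if i < 0 or i >= len(seq):
--         return 0
--     b = seq[i]
--     if b not in "ACGT":
--         return 0
--     L = i
--     while L - 1 >= 0 and seq[L - 1] == b:
--         L -= 1
--     R = i
--     while R + 1 < len(seq) and seq[R + 1] == b: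
--         R += 1
--     return R - L + 1
-- ===== SOURCE B (Python) =====
-- def hmer_len_at(seq: str, pos1: int) -> int:
--     """Calculate homopolymer length at given position (1-based)"""
--     if not seq:
--         return 0
--     i = pos1 - 1
--     if i < 0 or i >= len(seq):
--         return 0
--     off = 0
--     n = len(seq)
--     while True:
--         c = seq[off]
--         end = off + 1
--         while end < n and seq[end] == c:
--             end += 1
--         if i < end:
--             return end - off if c in "ACGT" else 0
--         off = end
-- ===== Notes on version B (the rewrite author's own statement) =====
-- stated objective: alternative
-- what changed: Replaces A's two-directional expansion (walk left then right from the query index) with a single left-to-right groupby-style scan over maximal runs, returning the length of the run that covers the index.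
import Mathlib
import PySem

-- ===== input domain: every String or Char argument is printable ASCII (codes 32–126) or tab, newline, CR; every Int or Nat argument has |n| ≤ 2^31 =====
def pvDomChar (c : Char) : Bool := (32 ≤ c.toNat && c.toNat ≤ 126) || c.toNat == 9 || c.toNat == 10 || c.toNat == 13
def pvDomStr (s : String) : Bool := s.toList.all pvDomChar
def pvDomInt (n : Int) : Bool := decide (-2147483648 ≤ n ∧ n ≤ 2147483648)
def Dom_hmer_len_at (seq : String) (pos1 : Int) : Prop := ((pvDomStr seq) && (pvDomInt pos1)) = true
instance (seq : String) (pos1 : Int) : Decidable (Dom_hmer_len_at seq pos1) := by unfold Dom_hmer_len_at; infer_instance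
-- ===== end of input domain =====

-- B replaces A's two-directional local expansion around the query index by a single
-- left-to-right scan over maximal runs (groupby-style); objective: alternative, same cost.

-- ===== PORT A =====
-- while L - 1 >= 0 and seq[L-1] == b: L -= 1   (structural recursion on L)
def hmerGoL (l : List Char) (b : Char) : Nat → Nat
  | 0 => 0
  | L + 1 => if l.getD L ' ' = b then hmerGoL l b L else L + 1

-- while R + 1 < len(seq) and seq[R+1] == b: R += 1   (recursion, fuel = length - R)
def hmerGoR (l : List Char) (b : Char) (R : Nat) : Nat :=
  if h : R + 1 < l.length ∧ l.getD (R + 1) ' ' = b then hmerGoR l b (R + 1) else R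
termination_by l.length - R

def hmer_len_at (seq : String) (pos1 : Int) : Int :=
  let l := seq.toList
  if l = [] then 0
  else if pos1 - 1 < 0 ∨ (l.length : Int) ≤ pos1 - 1 then 0
  else
    let i := (pos1 - 1).toNat
    let b := l.getD i ' '
    if ¬ ("ACGT".toList.contains b) then 0
    else ((hmerGoR l b i : Int) - (hmerGoL l b i : Int) + 1)

-- ===== PORT B =====
-- outer while True loop over runs: the inner 'while end < n and seq[end]==c' scan is
-- takeWhile, the remaining suffix seq[end:] is dropWhile.
def hmerScanRuns (l : List Char) (i : Nat) : Int :=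
  match l with
  | [] => 0
  | c :: rest =>
    let k := 1 + (rest.takeWhile (· == c)).length
    if i < k then (if "ACGT".toList.contains c then (k : Int) else 0)
    else hmerScanRuns (rest.dropWhile (· == c)) (i - k)
termination_by l.length
decreasing_by
  simp only [List.length_cons]
  exact Nat.lt_succ_of_le (List.length_dropWhile_le _ _)

def hmer_len_at_alt (seq : String) (pos1 : Int) : Int :=
  let l := seq.toList
  if l = [] then 0
  else if pos1 - 1 < 0 ∨ (l.length : Int) ≤ pos1 - 1 then 0
  else hmerScanRuns l (pos1 - 1).toNat

-- ===== PRECONDITION & SPEC =====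
def Spec_hmer_len_at (seq : String) (pos1 : Int) (out : Int) : Prop := out = hmer_len_at_alt seq pos1
instance (seq : String) (pos1 : Int) (out : Int) : Decidable (Spec_hmer_len_at seq pos1 out) := by unfold Spec_hmer_len_at; infer_instance

-- ===== CLAIM (what is proved, stated in full; the proofs are below) =====
def Claim_equal_hmer_len_at : Prop := ∀ (seq : String) (pos1 : Int), Dom_hmer_len_at seq pos1 → Spec_hmer_len_at seq pos1 (hmer_len_at seq pos1)

-- ===== LEMMAS AND PROOFS =====

-- `L, R` are the boundaries of the maximal run of `b` around `i` in `l`.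
def IsRun (l : List Char) (i L R : Nat) (b : Char) : Prop :=
  L ≤ i ∧ i ≤ R ∧ R < l.length ∧
  (∀ j, L ≤ j → j ≤ R → l.getD j ' ' = b) ∧
  (L = 0 ∨ l.getD (L - 1) ' ' ≠ b) ∧
  (R + 1 = l.length ∨ l.getD (R + 1) ' ' ≠ b)

theorem hmerGoL_le (l : List Char) (b : Char) (i : Nat) : hmerGoL l b i ≤ i := by
  induction i with
  | zero => simp [hmerGoL]
  | succ n ih =>
    rw [hmerGoL]
    split
    · exact le_trans ih (Nat.le_succ n)
    · exact le_refl _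

theorem hmerGoL_run (l : List Char) (b : Char) (i : Nat) :
    ∀ j, hmerGoL l b i ≤ j → j < i → l.getD j ' ' = b := by
  induction i with
  | zero => omega
  | succ n ih =>
    intro j hj hjn
    rw [hmerGoL] at hj
    split at hj
    · rcases Nat.lt_or_ge j n with h | h
      · exact ih j hj h
      · have : j = n := by omega
        subst this; assumption
    · omega

theorem hmerGoL_boundary (l : List Char) (b : Char) (i : Nat) :
    hmerGoL l b i = 0 ∨ l.getD (hmerGoL l b i - 1) ' ' ≠ b := by
  induction i with
  | zero => left; rfl
  | succ n ih =>
    rw [hmerGoL]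
    split
    · exact ih
    · right; simpa

theorem hmerGoR_ge (l : List Char) (b : Char) (i : Nat) : i ≤ hmerGoR l b i := by
  induction i using hmerGoR.induct l b with
  | case1 i h ih =>
    rw [hmerGoR, dif_pos h]
    omega
  | case2 i h => rw [hmerGoR, dif_neg h]

theorem hmerGoR_lt (l : List Char) (b : Char) (i : Nat) (hi : i < l.length) :
    hmerGoR l b i < l.length := by
  induction i using hmerGoR.induct l b with
  | case1 i h ih =>
    rw [hmerGoR, dif_pos h]
    exact ih h.1
  | case2 i h => rw [hmerGoR, dif_neg h]; exact hi

theorem hmerGoR_run (l : List Char) (b : Char) (i : Nat) :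
    ∀ j, i < j → j ≤ hmerGoR l b i → l.getD j ' ' = b := by
  induction i using hmerGoR.induct l b with
  | case1 i h ih =>
    intro j h1 h2
    rw [hmerGoR, dif_pos h] at h2
    rcases Nat.lt_or_ge (i + 1) j with hlt | hge
    · exact ih j hlt h2
    · have : j = i + 1 := by omega
      subst this; exact h.2
  | case2 i h =>
    intro j h1 h2
    rw [hmerGoR, dif_neg h] at h2
    omega

theorem hmerGoR_boundary (l : List Char) (b : Char) (i : Nat) (hi : i < l.length) :
    hmerGoR l b i + 1 = l.length ∨ l.getD (hmerGoR l b i + 1) ' ' ≠ b := by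
  induction i using hmerGoR.induct l b with
  | case1 i h ih => rw [hmerGoR, dif_pos h]; exact ih h.1
  | case2 i h =>
    rw [hmerGoR, dif_neg h]
    rcases Nat.lt_or_ge (i + 1) l.length with hlt | hge
    · right; intro hb; exact h ⟨hlt, hb⟩
    · left; omega

theorem isRun_A (l : List Char) (i : Nat) (b : Char) (hi : i < l.length)
    (hb : l.getD i ' ' = b) : IsRun l i (hmerGoL l b i) (hmerGoR l b i) b := by
  refine ⟨hmerGoL_le l b i, hmerGoR_ge l b i, hmerGoR_lt l b i hi, ?_, hmerGoL_boundary l b i, hmerGoR_boundary l b i hi⟩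
  intro j h1 h2
  rcases Nat.lt_trichotomy j i with h | h | h
  · exact hmerGoL_run l b i j h1 h
  · subst h; exact hb
  · exact hmerGoR_run l b i j h h2

-- index facts on a list of shape c :: (t ++ d) where every element of t is c
theorem getD_run_lt (c : Char) (t d : List Char) (ht : ∀ x ∈ t, x = c)
    (j : Nat) (hj : j < t.length + 1) : (c :: (t ++ d)).getD j ' ' = c := by
  match j with
  | 0 => rfl
  | Nat.succ s =>
    have hs : s < t.length := by omega
    rw [List.getD_cons_succ]
    have : (t ++ d).getD s ' ' = t.getD s ' ' := by
      simp [List.getD, List.getElem?_append_left hs]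
    rw [this, List.getD_eq_getElem t ' ' hs]
    exact ht _ (List.getElem_mem hs)

theorem getD_run_ge (c : Char) (t d : List Char) (j : Nat) :
    (c :: (t ++ d)).getD (t.length + 1 + j) ' ' = d.getD j ' ' := by
  have h : t.length + 1 + j = (t.length + j) + 1 := by omega
  rw [h, List.getD_cons_succ]
  simp [List.getD, List.getElem?_append_right]

-- facts about d = dropWhile: its head differs from c
theorem dropWhile_head_ne (c : Char) (rest : List Char)
    (hd : 0 < (rest.dropWhile (· == c)).length) :
    (rest.dropWhile (· == c)).getD 0 ' ' ≠ c := by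
  cases hcase : rest.dropWhile (· == c) with
  | nil => rw [hcase] at hd; simp at hd
  | cons y ys =>
    have h := List.head?_dropWhile_not (· == c) rest
    rw [hcase] at h
    simp only [List.head?_cons] at h
    simp only [List.getD_cons_zero]
    intro hc
    subst hc
    simp at h

theorem run_first (c : Char) (rest : List Char) (i L R : Nat)
    (hik : i < 1 + (rest.takeWhile (· == c)).length)
    (h : IsRun (c :: rest) i L R ((c :: rest).getD i ' ')) :
    L = 0 ∧ R = (rest.takeWhile (· == c)).length ∧ (c :: rest).getD i ' ' = c := by
  obtain ⟨hL, hiR, hR, run, lb, rb⟩ := h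
  set t := rest.takeWhile (· == c) with htdef
  set d := rest.dropWhile (· == c) with hddef
  have hsplit : c :: rest = c :: (t ++ d) := by
    rw [htdef, hddef, List.takeWhile_append_dropWhile]
  have ht : ∀ x ∈ t, x = c := by
    intro x hx
    rw [htdef] at hx
    exact eq_of_beq (List.mem_takeWhile_imp (p := fun y => y == c) hx)
  have hlen : (c :: rest).length = 1 + t.length + d.length := by
    rw [hsplit]; simp; omega
  have hbi : (c :: rest).getD i ' ' = c := by
    conv_lhs => rw [hsplit]
    exact getD_run_lt c t d ht i (by omega)
  rw [hbi] at run lb rb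
  have hL0 : L = 0 := by
    rcases lb with h0 | hne
    · exact h0
    · by_contra hc
      apply hne
      conv_lhs => rw [hsplit]
      exact getD_run_lt c t d ht (L - 1) (by omega)
  have hRt : R = t.length := by
    by_contra hc
    rcases Nat.lt_or_ge R t.length with hlt | hge
    · rcases rb with h0 | hne
      · omega
      · apply hne
        conv_lhs => rw [hsplit]
        exact getD_run_lt c t d ht (R + 1) (by omega)
    · have hge' : t.length + 1 ≤ R := by omega
      have hdpos : 0 < d.length := by omega
      have hrunk : (c :: rest).getD (t.length + 1) ' ' = c := run (t.length + 1) (by omega) (by omega)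
      rw [hsplit] at hrunk
      have e : (c :: (t ++ d)).getD (t.length + 1 + 0) ' ' = d.getD 0 ' ' := getD_run_ge c t d 0
      rw [Nat.add_zero] at e
      rw [e] at hrunk
      exact dropWhile_head_ne c rest hdpos hrunk
  exact ⟨hL0, hRt, hbi⟩

theorem run_rest (c : Char) (rest : List Char) (i L R : Nat)
    (hik : ¬ i < 1 + (rest.takeWhile (· == c)).length)
    (h : IsRun (c :: rest) i L R ((c :: rest).getD i ' ')) :
    1 + (rest.takeWhile (· == c)).length ≤ L ∧
    (c :: rest).getD i ' ' =
      (rest.dropWhile (· == c)).getD (i - (1 + (rest.takeWhile (· == c)).length)) ' ' ∧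
    IsRun (rest.dropWhile (· == c)) (i - (1 + (rest.takeWhile (· == c)).length))
      (L - (1 + (rest.takeWhile (· == c)).length)) (R - (1 + (rest.takeWhile (· == c)).length))
      ((c :: rest).getD i ' ') := by
  obtain ⟨hL, hiR, hR, run, lb, rb⟩ := h
  set t := rest.takeWhile (· == c) with htdef
  set d := rest.dropWhile (· == c) with hddef
  set k := 1 + t.length with hkdef
  have hsplit : c :: rest = c :: (t ++ d) := by
    rw [htdef, hddef, List.takeWhile_append_dropWhile]
  have ht : ∀ x ∈ t, x = c := by
    intro x hx
    rw [htdef] at hx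
    exact eq_of_beq (List.mem_takeWhile_imp (p := fun y => y == c) hx)
  have hlen : (c :: rest).length = k + d.length := by
    rw [hsplit]; simp; omega
  have hshift : ∀ j, (c :: rest).getD (k + j) ' ' = d.getD j ' ' := by
    intro j
    conv_lhs => rw [hsplit]
    rw [show k + j = t.length + 1 + j by omega]
    exact getD_run_ge c t d j
  have hkL : k ≤ L := by
    by_contra hc
    rw [Nat.not_le] at hc
    have hdpos : 0 < d.length := by omega
    have hbc : (c :: rest).getD i ' ' = c := by
      have h1 : (c :: rest).getD (k - 1) ' ' = (c :: rest).getD i ' ' :=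
        run (k - 1) (by omega) (by omega)
      have h2 : (c :: rest).getD (k - 1) ' ' = c := by
        conv_lhs => rw [hsplit]
        exact getD_run_lt c t d ht (k - 1) (by omega)
      rw [h2] at h1; exact h1.symm
    have h3 : (c :: rest).getD k ' ' = (c :: rest).getD i ' ' := run k (by omega) (by omega)
    have h4 : (c :: rest).getD k ' ' = d.getD 0 ' ' := by
      have := hshift 0; rw [Nat.add_zero] at this; exact this
    rw [h4, hbc] at h3
    exact dropWhile_head_ne c rest hdpos h3
  have hbi : (c :: rest).getD i ' ' = d.getD (i - k) ' ' := by
    have := hshift (i - k)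
    rw [show k + (i - k) = i by omega] at this
    exact this
  refine ⟨hkL, hbi, by omega, by omega, by omega, ?_, ?_, ?_⟩
  · intro j hj1 hj2
    have := run (k + j) (by omega) (by omega)
    rw [hshift j] at this
    exact this
  · rcases Nat.eq_or_lt_of_le hkL with heq | hlt
    · left; omega
    · rcases lb with h0 | hne
      · omega
      · right
        intro hcontr
        apply hne
        rw [show L - 1 = k + (L - k - 1) by omega, hshift]
        exact hcontr
  · rcases rb with h0 | hne
    · left; omega
    · right
      intro hcontr
      apply hne
      rw [show R + 1 = k + (R - k + 1) by omega, hshift]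
      exact hcontr

theorem hmerScanRuns_of_run (l : List Char) (i : Nat) :
    ∀ L R, IsRun l i L R (l.getD i ' ') →
      hmerScanRuns l i =
        (if "ACGT".toList.contains (l.getD i ' ') then (R : Int) - (L : Int) + 1 else 0) := by
  induction l, i using hmerScanRuns.induct with
  | case1 i =>
    intro L R h
    exact absurd h.2.2.1 (by simp)
  | case2 i c rest k hik hcon =>
    intro L R h
    obtain ⟨hL0, hRt, hbi⟩ := run_first c rest i L R hik h
    have hik' : i < 1 + (rest.takeWhile (· == c)).length := hik
    rw [hmerScanRuns]
    simp only [hbi, if_pos hik', if_pos hcon, hL0, hRt]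
    push_cast
    ring
  | case3 i c rest k hik hcon =>
    intro L R h
    obtain ⟨_, _, hbi⟩ := run_first c rest i L R hik h
    have hik' : i < 1 + (rest.takeWhile (· == c)).length := hik
    rw [hmerScanRuns]
    simp only [hbi, if_pos hik', if_neg hcon]
  | case4 i c rest k hik ih =>
    intro L R h
    have hL := h.1
    have hiR := h.2.1
    obtain ⟨hkL, hbi, hrun⟩ := run_rest c rest i L R hik h
    rw [hbi] at hrun
    have hik' : ¬ i < 1 + (rest.takeWhile (· == c)).length := hik
    rw [hmerScanRuns]
    simp only [if_neg hik']
    rw [ih _ _ hrun, hbi]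
    split_ifs
    · omega
    · rfl

theorem hmer_main (l : List Char) (i : Nat) (hi : i < l.length) :
    hmerScanRuns l i =
      (if "ACGT".toList.contains (l.getD i ' ') then
        ((hmerGoR l (l.getD i ' ') i : Int) - (hmerGoL l (l.getD i ' ') i : Int) + 1) else 0) :=
  hmerScanRuns_of_run l i _ _ (isRun_A l i _ hi rfl)

-- ===== VERDICT (by name: the statement is the Claim_ definition above) =====
theorem hmer_len_at_spec : Claim_equal_hmer_len_at := by
  intro seq pos1 _
  unfold Spec_hmer_len_at hmer_len_at hmer_len_at_alt
  simp only []
  split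
  · rfl
  · split
    · rfl
    · rename_i hne hrange
      have hi : (pos1 - 1).toNat < seq.toList.length := by omega
      rw [hmer_main seq.toList (pos1 - 1).toNat hi]
      split <;> simp_all
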